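-- pv_equiv track=rewrite | github.com/FlintLeng/rpi-inference | tools/distill_to_rpi.py | learn_embeddings
-- ===== SOURCE A (Python) =====
-- from collections import defaultdict
--
-- CELLS_PER_BANK = 128
--
-- def learn_embeddings(labels, tokens, n_cells=CELLS_PER_BANK):
--     """Learn token → seed cell mapping."""
--     token_cell_counts = defaultdict(lambda: defaultdict(int))
--
--     for i in range(len(labels)):
--         token_cell_counts[tokens[i]][labels[i]] += 1
--
--     # Most common cell per token
--     embed_map = {}
--     for tok, cells in token_cell_counts.items():
--         embed_map[tok] = max(cells, key=cells.get)
--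
--     return embed_map
-- ===== SOURCE B (Python) =====
-- CELLS_PER_BANK = 128
--
-- def _best_label(pairs, tok):
--     """Argmax label for tok by direct recounting: walk the distinct labels under tok
--     in first-occurrence order and recount each candidate with list.count."""
--     labs = [lab for t, lab in pairs if t == tok]
--     best_lab, best_cnt = None, 0
--     for lab in dict.fromkeys(labs):
--         c = labs.count(lab)
--         if c > best_cnt:
--             best_lab, best_cnt = lab, c
--     return best_lab
--
-- def learn_embeddings(labels, tokens, n_cells=CELLS_PER_BANK):
--     """Learn token -> seed cell mapping (no counting tables: per-token recount argmax)."""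
--     pairs = list(zip(tokens, labels))
--     embed_map = {}
--     for tok, _ in pairs:
--         if tok not in embed_map:
--             embed_map[tok] = _best_label(pairs, tok)
--     return embed_map
-- ===== Notes on version B (the rewrite author's own statement) =====
-- stated objective: alternative
-- what changed: B builds no counting structures at all: it walks the zipped pairs, and for each token at its first occurrence picks the argmax label by filtering out that token's label list, walking its distinct labels in first-occurrence order and recounting each candidate with list.count, instead of A's one-pass nested dict-of-dicts counting plus a per-token max() call.
import Mathlib
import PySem

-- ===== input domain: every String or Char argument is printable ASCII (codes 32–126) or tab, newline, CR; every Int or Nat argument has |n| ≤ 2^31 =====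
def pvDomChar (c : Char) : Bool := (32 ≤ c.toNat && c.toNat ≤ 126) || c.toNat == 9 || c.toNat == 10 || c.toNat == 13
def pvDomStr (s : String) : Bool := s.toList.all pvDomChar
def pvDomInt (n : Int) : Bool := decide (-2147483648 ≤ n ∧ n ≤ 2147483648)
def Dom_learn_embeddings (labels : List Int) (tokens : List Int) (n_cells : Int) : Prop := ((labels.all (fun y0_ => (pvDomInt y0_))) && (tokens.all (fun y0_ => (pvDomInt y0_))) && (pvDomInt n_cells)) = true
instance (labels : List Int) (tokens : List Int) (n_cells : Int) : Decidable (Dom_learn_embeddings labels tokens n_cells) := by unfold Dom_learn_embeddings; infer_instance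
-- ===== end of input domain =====

-- B drops A's counting tables entirely: per token (at first occurrence) it recounts each candidate
-- label directly with list.count over the token's filtered label list (alternative decomposition, not faster).

-- ===== PORT A =====
-- tokens[i]/labels[i] are exact within Pre_ (every index is in range there); the `.getD 0`
-- defaults are never reached inside Pre_ (Python's max() runs over the always-nonempty inner dict).
def learn_embeddings (labels : List Int) (tokens : List Int) (n_cells : Int) : List (Int × Int) :=
  let tcc : PySem.Dict Int (PySem.Dict Int Int) :=
    (PySem.List.pyRange 0 (labels.length : Int)).foldl
      (fun d i =>
        d.insert (PySem.List.pyGetD tokens i 0)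
          ((d.getD (PySem.List.pyGetD tokens i 0) PySem.Dict.empty).modify
            (PySem.List.pyGetD labels i 0) 0 (· + 1)))
      PySem.Dict.empty
  let em : PySem.Dict Int Int :=
    tcc.items.foldl
      (fun em p => em.insert p.1 ((PySem.List.max? p.2.keys (fun k => p.2.getD k 0)).getD 0))
      PySem.Dict.empty
  em.items

-- ===== PORT B =====
-- _best_label: walk the distinct labels under tok in first-occurrence order
-- (dict.fromkeys = PySem.Set.ofList), recount each with labs.count, keep on strict improvement.
-- best_lab is Python's None until the first label; it is never still None at return inside the
-- caller (labs contains the calling pair's own label), so `.getD 0` is unreached.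
def pvBestLabel (pairs : List (Int × Int)) (tok : Int) : Option Int × Int :=
  let labs := (pairs.filter (fun q => q.1 == tok)).map (fun q => q.2)
  (PySem.Set.ofList labs).foldl
    (fun b lab =>
      let c : Int := (labs.count lab : Int)
      if c > b.2 then (some lab, c) else b)
    ((none : Option Int), (0 : Int))

def learn_embeddings_alt (labels : List Int) (tokens : List Int) (n_cells : Int) : List (Int × Int) :=
  let pairs := tokens.zip labels
  (pairs.foldl
    (fun r p => if r.contains p.1 then r else r.insert p.1 ((pvBestLabel pairs p.1).1.getD 0))
    (PySem.Dict.empty : PySem.Dict Int Int)).items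

-- ===== PRECONDITION & SPEC =====
-- A indexes tokens[i] for every i < len(labels): it raises IndexError when tokens is shorter
-- than labels; exactly those inputs are excluded.
def Pre_learn_embeddings (labels : List Int) (tokens : List Int) (n_cells : Int) : Prop :=
  labels.length ≤ tokens.length
instance (labels : List Int) (tokens : List Int) (n_cells : Int) : Decidable (Pre_learn_embeddings labels tokens n_cells) := by unfold Pre_learn_embeddings; infer_instance

def pvWitness_learn_embeddings : List Int × List Int × Int := ([1, 2, 1], [7, 8, 7], 128)

def Spec_learn_embeddings (labels : List Int) (tokens : List Int) (n_cells : Int) (out : List (Int × Int)) : Prop := out = learn_embeddings_alt labels tokens n_cells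
instance (labels : List Int) (tokens : List Int) (n_cells : Int) (out : List (Int × Int)) : Decidable (Spec_learn_embeddings labels tokens n_cells out) := by unfold Spec_learn_embeddings; infer_instance

-- ===== CLAIM (what is proved, stated in full; the proofs are below) =====
def Claim_equal_learn_embeddings : Prop := ∀ (labels : List Int) (tokens : List Int) (n_cells : Int), Dom_learn_embeddings labels tokens n_cells → Pre_learn_embeddings labels tokens n_cells → Spec_learn_embeddings labels tokens n_cells (learn_embeddings labels tokens n_cells)

-- ===== LEMMAS AND PROOFS =====

-- labels occurring under token t, in order
def pvLabsOf (t : Int) (pairs : List (Int × Int)) : List Int :=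
  (pairs.filter (fun p => p.1 == t)).map (fun p => p.2)

-- A's index loop enumerates exactly the zipped pairs
lemma pv_map_range (labels tokens : List Int) (h : labels.length ≤ tokens.length) :
    (PySem.List.pyRange 0 (labels.length : Int)).map
        (fun i => (PySem.List.pyGetD tokens i 0, PySem.List.pyGetD labels i 0))
      = tokens.zip labels := by
  rw [PySem.List.pyRange_zero_natCast, List.map_map]
  apply List.ext_getElem
  · simp [List.length_zip]; omega
  · intro i h1 h2
    simp only [List.getElem_map, List.getElem_range, Function.comp_apply,
      PySem.List.pyGetD_natCast, List.getElem_zip]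
    simp at h1
    rw [List.getD_eq_getElem, List.getD_eq_getElem]

-- grouping loop: the inner dict at t is the fold over the labels seen under t
lemma pv_groupA (pairs : List (Int × Int)) (d : PySem.Dict Int (PySem.Dict Int Int)) (t : Int) :
    (pairs.foldl
        (fun d p => d.insert p.1 ((d.getD p.1 PySem.Dict.empty).modify p.2 0 (· + 1))) d).getD t
        PySem.Dict.empty
      = (pvLabsOf t pairs).foldl (fun inner l => inner.modify l 0 (· + 1))
          (d.getD t PySem.Dict.empty) := by
  induction pairs generalizing d with
  | nil => simp [pvLabsOf]
  | cons p rest ih =>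
    simp only [List.foldl_cons, ih, pvLabsOf]
    by_cases hp : p.1 = t
    · simp [hp, PySem.Dict.getD_insert_self]
    · simp [hp, PySem.Dict.getD_insert_of_ne _ _ _ (Ne.symm hp)]

lemma pv_ofList_append_singleton {α : Type} [BEq α] (xs : List α) (x : α) :
    PySem.Set.ofList (xs ++ [x]) = PySem.Set.add (PySem.Set.ofList xs) x := by
  rw [PySem.Set.ofList_eq_foldl, PySem.Set.ofList_eq_foldl, List.foldl_append]; rfl

lemma pv_contains_iff {α : Type} [BEq α] [LawfulBEq α] (xs : List α) (x : α) :
    PySem.Set.contains (PySem.Set.ofList xs) x = true ↔ x ∈ xs := by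
  simp [PySem.Set.contains, PySem.Set.mem_ofList]

lemma pv_mem_labsOf (pairs : List (Int × Int)) (t l : Int) :
    l ∈ pvLabsOf t pairs ↔ (t, l) ∈ pairs := by
  simp only [pvLabsOf, List.mem_map, List.mem_filter, beq_iff_eq]
  constructor
  · rintro ⟨p, ⟨hm, h1⟩, h2⟩; cases p; simp_all
  · intro hm; exact ⟨(t, l), ⟨hm, rfl⟩, rfl⟩

-- running max? from a seeded accumulator is the strict-improvement scan (Option-valued best)
lemma pv_maxstep (D : List Int) (k : Int → Int) (b : Int) :
    ∃ m, PySem.List.max? (b :: D) k = some m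
        ∧ D.foldl (fun a l => if k l > a.2 then (some l, k l) else a)
            ((some b : Option Int), k b) = (some m, k m) := by
  induction D generalizing b with
  | nil => exact ⟨b, by simp [PySem.List.max?], rfl⟩
  | cons x T ih =>
    by_cases h : k b < k x
    · obtain ⟨m, hm1, hm2⟩ := ih x
      refine ⟨m, ?_, ?_⟩
      · simpa [PySem.List.max?, h] using hm1
      · simpa [gt_iff_lt, h] using hm2
    · obtain ⟨m, hm1, hm2⟩ := ih b
      refine ⟨m, ?_, ?_⟩
      · simpa [PySem.List.max?, h] using hm1
      · simpa [gt_iff_lt, h] using hm2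

-- on a nonempty list with positive keys, the scan from (none, 0) computes max? (FIRST maximum)
lemma pv_scan_max (D : List Int) (k : Int → Int) (hpos : ∀ x ∈ D, 0 < k x) (hne : D ≠ []) :
    ∃ m, PySem.List.max? D k = some m
        ∧ D.foldl (fun a l => if k l > a.2 then (some l, k l) else a)
            ((none : Option Int), (0 : Int)) = (some m, k m) := by
  cases D with
  | nil => exact absurd rfl hne
  | cons x T =>
    have hx : 0 < k x := hpos x (List.mem_cons_self)
    obtain ⟨m, hm1, hm2⟩ := pv_maxstep T k x
    exact ⟨m, hm1, by rw [List.foldl_cons, if_pos (by simpa using hx)]; exact hm2⟩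

-- B's outer loop: first-occurrence tokens, each mapped through a fixed per-token function
lemma pv_first_occ_fold (f : Int → Int) (P : List (Int × Int)) :
    (P.foldl (fun r p => if r.contains p.1 then r else r.insert p.1 (f p.1))
        (PySem.Dict.empty : PySem.Dict Int Int)).items
      = (PySem.Set.ofList (P.map (fun p => p.1))).map (fun t => (t, f t)) := by
  induction P using List.reverseRecOn with
  | nil => rfl
  | append_singleton P q ih =>
    rw [List.foldl_append, List.foldl_cons, List.foldl_nil]
    set s := P.foldl (fun r p => if r.contains p.1 then r else r.insert p.1 (f p.1))
      (PySem.Dict.empty : PySem.Dict Int Int) with hs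
    have hkeys : s.keys = PySem.Set.ofList (P.map (fun p => p.1)) := by
      rw [PySem.Dict.keys, ih, List.map_map]
      exact List.map_id' _
    have hcont : s.contains q.1 = true ↔ q.1 ∈ P.map (fun p => p.1) := by
      rw [PySem.Dict.contains_iff_mem_keys, hkeys, PySem.Set.mem_ofList]
    rw [List.map_append, List.map_singleton, pv_ofList_append_singleton, PySem.Set.add]
    by_cases hq : q.1 ∈ P.map (fun p => p.1)
    · rw [if_pos (hcont.mpr hq), if_pos ((pv_contains_iff _ _).mpr hq), ih]
    · have hc : s.contains q.1 = false := by
        rw [← Bool.not_eq_true, hcont]; exact hq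
      rw [if_neg (by simp [hc]), if_neg (by simp [hq]),
        PySem.Dict.items_insert_of_not_contains _ _ hc, ih, List.map_append,
        List.map_singleton]
-- A's result, characterised per token
lemma pv_A_eq (labels tokens : List Int) (n_cells : Int) (h : labels.length ≤ tokens.length) :
    learn_embeddings labels tokens n_cells
      = (PySem.Set.ofList ((tokens.zip labels).map (fun p => p.1))).map
          (fun t =>
            (t, (PySem.List.max? (PySem.Set.ofList (pvLabsOf t (tokens.zip labels)))
                  (fun l => ((pvLabsOf t (tokens.zip labels)).count l : Int))).getD 0)) := by
  have hzip : ((PySem.List.pyRange 0 (labels.length : Int)).foldl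
      (fun d i =>
        d.insert (PySem.List.pyGetD tokens i 0)
          ((d.getD (PySem.List.pyGetD tokens i 0) PySem.Dict.empty).modify
            (PySem.List.pyGetD labels i 0) 0 (· + 1)))
      PySem.Dict.empty : PySem.Dict Int (PySem.Dict Int Int))
      = (tokens.zip labels).foldl
          (fun d p => d.insert p.1 ((d.getD p.1 PySem.Dict.empty).modify p.2 0 (· + 1)))
          PySem.Dict.empty := by
    rw [← pv_map_range labels tokens h, List.foldl_map]
  show (List.foldl
      (fun em p => em.insert p.1 ((PySem.List.max? p.2.keys (fun k => p.2.getD k 0)).getD 0))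
      PySem.Dict.empty
      ((List.foldl
          (fun d i =>
            d.insert (PySem.List.pyGetD tokens i 0)
              ((d.getD (PySem.List.pyGetD tokens i 0) PySem.Dict.empty).modify
                (PySem.List.pyGetD labels i 0) 0 (· + 1)))
          PySem.Dict.empty (PySem.List.pyRange 0 (labels.length : Int))
          : PySem.Dict Int (PySem.Dict Int Int)).items)).items = _
  rw [hzip]
  set pairs := tokens.zip labels with hpairs
  set tcc : PySem.Dict Int (PySem.Dict Int Int) := pairs.foldl
      (fun d p => d.insert p.1 ((d.getD p.1 PySem.Dict.empty).modify p.2 0 (· + 1)))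
      PySem.Dict.empty with htcc
  have hkeys : tcc.keys = PySem.Set.ofList (pairs.map (fun p => p.1)) := by
    rw [htcc, PySem.Dict.keys_foldl_insert_key pairs (fun p => p.1)
      (fun d p => (d.getD p.1 PySem.Dict.empty).modify p.2 0 (· + 1)) PySem.Dict.empty,
      PySem.Dict.keys_empty, PySem.Set.ofList_eq_foldl]
    rfl
  have hnodup : tcc.keys.Nodup := by
    rw [htcc]
    exact PySem.Dict.nodup_keys_foldl_insert_key pairs (fun p => p.1) _ _ PySem.Dict.nodup_keys_empty
  have hgetD : ∀ t, tcc.getD t PySem.Dict.empty = PySem.Dict.counter (pvLabsOf t pairs) := by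
    intro t
    rw [htcc, pv_groupA, PySem.Dict.getD_empty, PySem.Dict.counter_eq_foldl]
  have hitems : tcc.items = (PySem.Set.ofList (pairs.map (fun p => p.1))).map
      (fun t => (t, PySem.Dict.counter (pvLabsOf t pairs))) := by
    rw [PySem.Dict.items_eq_map_keys tcc hnodup PySem.Dict.empty, hkeys]
    exact List.map_congr_left (fun t _ => by rw [hgetD t])
  rw [hitems, List.foldl_map,
    PySem.Dict.items_foldl_insert_fresh (PySem.Set.ofList (pairs.map (fun p => p.1)))
      (fun t => t)
      (fun t => (PySem.List.max? (PySem.Dict.counter (pvLabsOf t pairs)).keys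
        (fun k => (PySem.Dict.counter (pvLabsOf t pairs)).getD k 0)).getD 0)
      PySem.Dict.empty
      (fun a _ => PySem.Dict.contains_empty a)
      (by rw [List.map_id']; exact PySem.Set.nodup_ofList _)]
  show List.map _ _ = _
  apply List.map_congr_left
  intro t ht
  have hkey : (fun k => (PySem.Dict.counter (pvLabsOf t pairs)).getD k 0)
      = fun l => ((pvLabsOf t pairs).count l : Int) :=
    funext (fun l => PySem.Dict.getD_counter (pvLabsOf t pairs) l)
  rw [PySem.Dict.keys_counter, hkey]

-- B's result: first-occurrence tokens mapped through the recounting argmax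
lemma pv_B_eq (labels tokens : List Int) (n_cells : Int) :
    learn_embeddings_alt labels tokens n_cells
      = (PySem.Set.ofList ((tokens.zip labels).map (fun p => p.1))).map
          (fun t => (t, (pvBestLabel (tokens.zip labels) t).1.getD 0)) :=
  pv_first_occ_fold (fun t => (pvBestLabel (tokens.zip labels) t).1.getD 0) (tokens.zip labels)

-- the recounting argmax equals max? over the distinct labels, when the token occurs
lemma pv_best_eq_max (pairs : List (Int × Int)) (t : Int)
    (hne : pvLabsOf t pairs ≠ []) :
    (pvBestLabel pairs t).1.getD 0
      = (PySem.List.max? (PySem.Set.ofList (pvLabsOf t pairs))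
          (fun l => ((pvLabsOf t pairs).count l : Int))).getD 0 := by
  show ((PySem.Set.ofList (pvLabsOf t pairs)).foldl
      (fun b lab => if ((pvLabsOf t pairs).count lab : Int) > b.2
        then (some lab, ((pvLabsOf t pairs).count lab : Int)) else b)
      ((none : Option Int), (0 : Int))).1.getD 0 = _
  have hDne : PySem.Set.ofList (pvLabsOf t pairs) ≠ [] := by
    obtain ⟨a, ha⟩ := List.exists_mem_of_ne_nil _ hne
    exact List.ne_nil_of_mem ((PySem.Set.mem_ofList _ _).mpr ha)
  have hpos : ∀ x ∈ PySem.Set.ofList (pvLabsOf t pairs),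
      0 < ((pvLabsOf t pairs).count x : Int) := fun x hx => by
    exact_mod_cast List.count_pos_iff.mpr ((PySem.Set.mem_ofList _ _).mp hx)
  obtain ⟨m, hm1, hm2⟩ := pv_scan_max (PySem.Set.ofList (pvLabsOf t pairs))
    (fun l => ((pvLabsOf t pairs).count l : Int)) hpos hDne
  rw [hm1, hm2]

-- ===== VERDICT (by name: the statement is the Claim_ definition above) =====
theorem learn_embeddings_spec : Claim_equal_learn_embeddings := by
  intro labels tokens n_cells _ hpre
  unfold Pre_learn_embeddings at hpre
  unfold Spec_learn_embeddings
  rw [pv_A_eq labels tokens n_cells hpre, pv_B_eq labels tokens n_cells]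
  apply List.map_congr_left
  intro t ht
  have htm : t ∈ (tokens.zip labels).map (fun p => p.1) := (PySem.Set.mem_ofList _ _).mp ht
  obtain ⟨p, hp, hpt⟩ := List.mem_map.mp htm
  have hlab : p.2 ∈ pvLabsOf t (tokens.zip labels) := by
    rw [pv_mem_labsOf]
    rwa [show (t, p.2) = p from by rw [Prod.ext_iff]; exact ⟨hpt.symm, rfl⟩]
  rw [pv_best_eq_max (tokens.zip labels) t (List.ne_nil_of_mem hlab)]
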